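-- pv_equiv track=rewrite | github.com/AzlanAmjad/Influx-Agent | app/src/agent/formatting.py | _truncate_timestamp
-- ===== SOURCE A (Python) =====
-- def _truncate_timestamp(ts: str) -> str:
--     """Shorten an ISO timestamp to seconds precision for display.
--
--     Drops sub-second fractional parts while preserving any timezone
--     suffix:  ``2026-04-10T14:30:00.000000+00:00`` → ``2026-04-10T14:30:00+00:00``
--     """
--     dot = ts.find(".")
--     if dot == -1:
--         return ts
--     # Find the start of the timezone suffix after the fractional part.
--     rest = ts[dot:]
--     for i, ch in enumerate(rest):
--         if ch in ("+", "-", "Z") and i > 0: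
--             return ts[:dot] + rest[i:]
--     return ts[:dot]
-- ===== SOURCE B (Python) =====
-- def _truncate_timestamp(ts: str) -> str:
--     """Branchless: split at the first dot, cut the tail at the earliest
--     timezone marker found via str.find, default = whole tail."""
--     head, _, tail = ts.partition(".")
--     cuts = [p for p in (tail.find(c) for c in "+-Z") if p != -1]
--     pos = min(cuts) if cuts else len(tail)
--     return head + tail[pos:]
-- ===== Notes on version B (the rewrite author's own statement) =====
-- stated objective: idiomatic
-- what changed: A finds the dot and then walks the suffix character by character with an enumerate loop and a positive-index guard; B partitions the string at the first dot and cuts the tail at the minimum of str.find results for the three timezone marker characters, i.e. a branchless split plus min-of-finds with no hand-written character loop.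
import Mathlib
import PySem

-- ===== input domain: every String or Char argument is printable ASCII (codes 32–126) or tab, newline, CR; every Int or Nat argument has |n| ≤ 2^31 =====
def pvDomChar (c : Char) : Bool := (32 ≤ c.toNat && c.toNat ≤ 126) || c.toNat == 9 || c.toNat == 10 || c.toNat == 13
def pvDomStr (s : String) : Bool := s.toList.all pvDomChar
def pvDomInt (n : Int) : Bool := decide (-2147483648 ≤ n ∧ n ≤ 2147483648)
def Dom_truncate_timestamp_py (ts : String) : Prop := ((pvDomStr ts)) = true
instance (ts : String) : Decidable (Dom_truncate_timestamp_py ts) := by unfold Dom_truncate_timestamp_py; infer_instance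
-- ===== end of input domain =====

-- B replaces A's index-based scan over the suffix by a branchless partition + min-of-finds cut (idiomatic; same asymptotic cost).
-- ===== PORT A =====
-- the 'for i, ch in enumerate(rest)' loop of A; state = (ts, dot, rest)
def pvALoop (ts : String) (dot : Int) (rest : List Char) : List (Int × Char) → String
  | [] => String.ofList (PySem.List.slice ts.toList none (some dot))
  | (i, ch) :: more =>
    if (ch == '+' || ch == '-' || ch == 'Z') && decide (0 < i) then
      String.ofList (PySem.List.slice ts.toList none (some dot) ++ PySem.List.slice rest (some i) none)
    else pvALoop ts dot rest more

def truncate_timestamp_py (ts : String) : String :=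
  let dot := PySem.Str.find ts "."
  if dot == -1 then ts
  else
    let rest := PySem.List.slice ts.toList (some dot) none
    pvALoop ts dot rest (PySem.List.enumerate rest 0)

-- ===== PORT B =====
-- 'min(cuts) if cuts else dflt'
def pvMinDefault (cuts : List Int) (dflt : Int) : Int :=
  match cuts with
  | [] => dflt
  | x :: xs => xs.foldl min x

def truncate_timestamp_py_alt (ts : String) : String :=
  let cs := ts.toList
  let head := cs.takeWhile (fun c => c != '.')
  let tail := (cs.dropWhile (fun c => c != '.')).tail
  let cuts := (['+', '-', 'Z'].map (fun c => PySem.Chars.find tail [c])).filter (fun p => p != -1)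
  let pos := pvMinDefault cuts (tail.length : Int)
  String.ofList (head ++ PySem.List.slice tail (some pos) none)

-- ===== PRECONDITION & SPEC =====
def Spec_truncate_timestamp_py (ts : String) (out : String) : Prop := out = truncate_timestamp_py_alt ts
instance (ts : String) (out : String) : Decidable (Spec_truncate_timestamp_py ts out) := by unfold Spec_truncate_timestamp_py; infer_instance

-- ===== CLAIM (what is proved, stated in full; the proofs are below) =====
def Claim_equal_truncate_timestamp_py : Prop := ∀ (ts : String), Dom_truncate_timestamp_py ts → Spec_truncate_timestamp_py ts (truncate_timestamp_py ts)

-- ===== LEMMAS AND PROOFS =====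

def pvTz (c : Char) : Bool := c == '+' || c == '-' || c == 'Z'

theorem pv_tw_getElem? {α : Type} (p : α → Bool) (l : List α) (i : Nat)
    (hi : i < (l.takeWhile p).length) : ∃ y, l[i]? = some y ∧ p y = true := by
  induction l generalizing i with
  | nil => simp at hi
  | cons a l ih =>
    by_cases hp : p a = true
    · cases i with
      | zero => exact ⟨a, by simp, hp⟩
      | succ i =>
        simp [List.takeWhile, hp] at hi
        obtain ⟨y, hy, hpy⟩ := ih i (by omega)
        exact ⟨y, by simpa using hy, hpy⟩
    · simp [List.takeWhile, eq_false_of_ne_true hp] at hi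

theorem pv_tw_boundary {α : Type} (p : α → Bool) (l : List α)
    (h : (l.takeWhile p).length < l.length) :
    ∃ y, l[(l.takeWhile p).length]? = some y ∧ p y = false := by
  induction l with
  | nil => simp at h
  | cons a l ih =>
    by_cases hp : p a = true
    · simp [List.takeWhile, hp] at h ⊢
      obtain ⟨y, hy, hpy⟩ := ih (by omega)
      exact ⟨y, hy, hpy⟩
    · refine ⟨a, ?_, eq_false_of_ne_true hp⟩
      simp [List.takeWhile, eq_false_of_ne_true hp]

theorem pv_tw_mono {α : Type} (p q : α → Bool) (h : ∀ x, p x = true → q x = true)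
    (l : List α) : (l.takeWhile p).length ≤ (l.takeWhile q).length := by
  induction l with
  | nil => simp
  | cons a l ih =>
    by_cases hp : p a = true
    · simp [List.takeWhile, hp, h a hp]; omega
    · simp [List.takeWhile, eq_false_of_ne_true hp]

theorem pv_tw_le_of_false {α : Type} (p : α → Bool) (l : List α) (k : Nat) (y : α)
    (hy : l[k]? = some y) (hp : p y = false) : (l.takeWhile p).length ≤ k := by
  by_contra hlt
  obtain ⟨z, hz, hpz⟩ := pv_tw_getElem? p l k (by omega)
  rw [hy] at hz; cases hz; simp [hpz] at hp

theorem pv_tw_eq_len {α : Type} (p : α → Bool) (l : List α) (h : ∀ x ∈ l, p x = true) :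
    (l.takeWhile p).length = l.length := by
  rw [List.takeWhile_eq_self_iff.mpr h]

theorem pv_singleton_prefix (c : Char) (l : List Char) (i : Nat) :
    ([c] <+: l.drop i) ↔ l[i]? = some c := by
  rw [← List.head?_drop]
  constructor
  · rintro ⟨t, ht⟩
    rw [← ht]; simp
  · intro h
    cases hd : l.drop i with
    | nil => simp [hd] at h
    | cons a t => rw [hd] at h; simp at h; exact ⟨t, by simp [h]⟩

theorem pv_find_singleton_mem (c : Char) (cs : List Char) (h : c ∈ cs) :
    PySem.Chars.find cs [c] = ((cs.takeWhile (fun x => x != c)).length : Int) := by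
  have hinf : [c] <:+: cs := by
    obtain ⟨s, t, rfl⟩ := List.append_of_mem h
    exact ⟨s, t, by simp⟩
  have hnn : 0 ≤ PySem.Chars.find cs [c] := (PySem.Chars.find_nonneg_iff cs [c]).mpr hinf
  obtain ⟨hpre, hmin⟩ := PySem.Chars.find_spec hnn
  set n := (PySem.Chars.find cs [c]).toNat with hn
  set w := (cs.takeWhile (fun x => x != c)).length with hw
  -- the char at n is c
  have hcn : cs[n]? = some c := (pv_singleton_prefix c cs n).mp hpre
  -- w ≤ n
  have hwn : w ≤ n := pv_tw_le_of_false _ cs n c hcn (by simp)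
  -- w < cs.length, char at w is c
  have hwlen : w < cs.length := by
    have : n < cs.length := by
      have := List.getElem?_eq_some_iff.mp hcn
      exact this.1
    omega
  obtain ⟨y, hy, hpy⟩ := pv_tw_boundary (fun x => x != c) cs (by omega)
  have hyc : y = c := by simpa using hpy
  subst hyc
  have hnw : n ≤ w := by
    by_contra hlt
    exact hmin w (by omega) ((pv_singleton_prefix y cs w).mpr (by exact hy))
  have : n = w := by omega
  omega

theorem pv_find_singleton_not_mem (c : Char) (cs : List Char) (h : c ∉ cs) :
    PySem.Chars.find cs [c] = -1 := by
  rw [PySem.Chars.find_eq_neg_one_iff]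
  intro hinf
  exact h (hinf.subset (by simp))

theorem pv_foldl_min (w : Int) : ∀ (xs : List Int) (x : Int), w ≤ x →
    (∀ y ∈ xs, w ≤ y) → (x = w ∨ w ∈ xs) → xs.foldl min x = w := by
  intro xs
  induction xs with
  | nil =>
    rintro x hx _ (rfl | hm)
    · rfl
    · simp at hm
  | cons a l ih =>
    intro x hx hall hm
    simp only [List.foldl_cons]
    have ha : w ≤ a := hall a (by simp)
    rcases hm with rfl | hm
    · exact ih (min x a) (le_min hx ha) (fun y hy => hall y (by simp [hy])) (Or.inl (by omega))
    · rcases List.mem_cons.mp hm with heq | hm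
      · exact ih (min x a) (le_min hx ha) (fun y hy => hall y (by simp [hy]))
          (Or.inl (le_antisymm (le_of_le_of_eq (min_le_right x a) heq.symm) (le_min hx ha)))
      · exact ih (min x a) (le_min hx ha) (fun y hy => hall y (by simp [hy])) (Or.inr hm)

theorem pvTz_of_mem (c : Char) (h : c ∈ (['+', '-', 'Z'] : List Char)) : pvTz c = true := by
  fin_cases h <;> decide

theorem pv_bpos (tl : List Char) :
    pvMinDefault ((['+', '-', 'Z'].map (fun c => PySem.Chars.find tl [c])).filter (fun p => p != -1))
      (tl.length : Int) = ((tl.takeWhile (fun c => !(pvTz c))).length : Int) := by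
  set w := (tl.takeWhile (fun c => !(pvTz c))).length with hw
  by_cases htz : ∃ c ∈ tl, pvTz c = true
  · -- some timezone char occurs
    have hwlt : w < tl.length := by
      obtain ⟨c, hc, hpc⟩ := htz
      obtain ⟨k, hk, hget⟩ := List.getElem_of_mem hc
      have hle : w ≤ k := pv_tw_le_of_false _ tl k c (by simp [hk, hget]) (by simp [hpc])
      omega
    obtain ⟨c0, hc0, hpc0⟩ := pv_tw_boundary (fun c => !(pvTz c)) tl hwlt
    have htz0 : pvTz c0 = true := by simpa using hpc0
    have hmem0 : c0 ∈ tl := List.mem_of_getElem? hc0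
    have hc0elem : c0 ∈ (['+', '-', 'Z'] : List Char) := by
      by_cases h1 : c0 = '+'; · simp [h1]
      by_cases h2 : c0 = '-'; · simp [h2]
      by_cases h3 : c0 = 'Z'; · simp [h3]
      exfalso; simp [pvTz, h1, h2, h3] at htz0
    -- find tl [c0] = w
    have hfc0 : PySem.Chars.find tl [c0] = (w : Int) := by
      rw [pv_find_singleton_mem c0 tl hmem0]
      have h1 : (tl.takeWhile (fun x => x != c0)).length ≤ w :=
        pv_tw_le_of_false _ tl w c0 hc0 (by simp)
      have h2 : w ≤ (tl.takeWhile (fun x => x != c0)).length := by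
        apply pv_tw_mono
        intro x hx
        simp at hx ⊢
        intro hxc; subst hxc; simp [hx] at htz0
      omega
    -- every kept cut is ≥ w
    have hall : ∀ y ∈ (['+', '-', 'Z'].map (fun c => PySem.Chars.find tl [c])).filter (fun p => p != -1),
        (w : Int) ≤ y := by
      intro y hy
      rw [List.mem_filter] at hy
      obtain ⟨hy1, hy2⟩ := hy
      obtain ⟨c, hc, rfl⟩ := List.mem_map.mp hy1
      have hcm : c ∈ tl := by
        by_contra hnm
        rw [pv_find_singleton_not_mem c tl hnm] at hy2
        simp at hy2
      rw [pv_find_singleton_mem c tl hcm]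
      have : w ≤ (tl.takeWhile (fun x => x != c)).length := by
        apply pv_tw_mono
        intro x hx
        simp at hx ⊢
        intro hxc; subst hxc
        simp [pvTz_of_mem x hc] at hx
      exact_mod_cast this
    -- w is among the kept cuts
    have hmemw : (w : Int) ∈ (['+', '-', 'Z'].map (fun c => PySem.Chars.find tl [c])).filter (fun p => p != -1) := by
      rw [List.mem_filter]
      constructor
      · exact List.mem_map.mpr ⟨c0, hc0elem, hfc0⟩
      · simp
    cases hcut : (['+', '-', 'Z'].map (fun c => PySem.Chars.find tl [c])).filter (fun p => p != -1) with
    | nil => rw [hcut] at hmemw; simp at hmemw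
    | cons x xs =>
      rw [hcut] at hall hmemw
      simp only [pvMinDefault]
      exact pv_foldl_min (w : Int) xs x (hall x (by simp)) (fun y hy => hall y (by simp [hy]))
        ((List.mem_cons.mp hmemw).elim (fun h => Or.inl h.symm) Or.inr)
  · -- no timezone char occurs
    push Not at htz
    have hweq : w = tl.length := pv_tw_eq_len _ tl (fun x hx => by
      have h0 : pvTz x = false := by simpa using htz x hx
      simp [h0])
    have hnil : (['+', '-', 'Z'].map (fun c => PySem.Chars.find tl [c])).filter (fun p => p != -1) = [] := by
      rw [List.filter_eq_nil_iff]
      intro y hy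
      obtain ⟨c, hc, rfl⟩ := List.mem_map.mp hy
      have hcm : c ∉ tl := by
        intro hm
        have := htz c hm
        simp [pvTz_of_mem c hc] at this
      simp [pv_find_singleton_not_mem c tl hcm]
    rw [hnil]
    simp [pvMinDefault, hweq]

theorem pv_aloop (ts : String) (dot : Int) (rest : List Char) :
    ∀ (tl : List Char) (j : Nat),
    pvALoop ts dot rest (PySem.List.enumerate tl ((j : Int) + 1)) =
      if tl.any pvTz then
        String.ofList (PySem.List.slice ts.toList none (some dot) ++
          PySem.List.slice rest (some ((j : Int) + 1 + ((tl.takeWhile (fun c => !(pvTz c))).length : Int))) none)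
      else String.ofList (PySem.List.slice ts.toList none (some dot)) := by
  intro tl
  induction tl with
  | nil => intro j; simp [PySem.List.enumerate_nil, pvALoop]
  | cons c tl ih =>
    intro j
    rw [PySem.List.enumerate_cons]
    by_cases hc : pvTz c = true
    · simp only [pvALoop]
      have hg : ((c == '+' || c == '-' || c == 'Z') && decide (0 < (j : Int) + 1)) = true := by
        have h2 : (0 : Int) < (j : Int) + 1 := by omega
        rw [show (c == '+' || c == '-' || c == 'Z') = pvTz c from rfl, hc]
        simp [h2]
      rw [if_pos hg]
      have hany : (c :: tl).any pvTz = true := by simp [hc]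
      rw [if_pos hany]
      have htw : (c :: tl).takeWhile (fun c => !(pvTz c)) = [] := by
        simp [List.takeWhile, hc]
      rw [htw]
      norm_num
    · have hcf : pvTz c = false := eq_false_of_ne_true hc
      simp only [pvALoop]
      have hg : ((c == '+' || c == '-' || c == 'Z') && decide (0 < (j : Int) + 1)) = false := by
        rw [show (c == '+' || c == '-' || c == 'Z') = pvTz c from rfl, hcf]
        simp
      rw [if_neg (by rw [hg]; simp)]
      have hstep : (j : Int) + 1 + 1 = ((j + 1 : Nat) : Int) + 1 := by push_cast; ring
      rw [hstep, ih (j + 1)]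
      have hany : (c :: tl).any pvTz = tl.any pvTz := by simp [hcf]
      rw [hany]
      by_cases ha : tl.any pvTz = true
      · rw [if_pos ha, if_pos ha]
        have htw : (c :: tl).takeWhile (fun c => !(pvTz c)) = c :: tl.takeWhile (fun c => !(pvTz c)) := by
          simp [List.takeWhile, hcf]
        rw [htw]
        have : ((j + 1 : Nat) : Int) + 1 + ((tl.takeWhile (fun c => !(pvTz c))).length : Int)
             = (j : Int) + 1 + (((c :: tl.takeWhile (fun c => !(pvTz c))).length : Nat) : Int) := by
          push_cast; ring_nf; simp [List.length_cons]; ring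
        rw [this]
      · rw [if_neg ha, if_neg ha]

theorem pv_main (ts : String) : truncate_timestamp_py ts = truncate_timestamp_py_alt ts := by
  by_cases hdot : '.' ∈ ts.toList
  · -- a dot is present
    set d := (ts.toList.takeWhile (fun c => c != '.')).length with hd
    have hfind : PySem.Chars.find ts.toList ['.'] = (d : Int) :=
      pv_find_singleton_mem '.' ts.toList hdot
    have hfind' : PySem.Str.find ts "." = (d : Int) := by
      rw [PySem.Str.find_eq]; exact hfind
    -- decompose ts.toList
    have hdw : ts.toList.dropWhile (fun c => c != '.') ≠ [] := by
      intro hnil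
      have := List.dropWhile_eq_nil_iff.mp hnil '.' hdot
      simp at this
    obtain ⟨d0, tl, hdweq⟩ : ∃ d0 tl, ts.toList.dropWhile (fun c => c != '.') = d0 :: tl := by
      cases h : ts.toList.dropWhile (fun c => c != '.') with
      | nil => exact absurd h hdw
      | cons a l => exact ⟨a, l, rfl⟩
    have hd0 : d0 = '.' := by
      have h1 := List.head_dropWhile_not (fun c => c != '.') hdw
      simp only [hdweq, List.head_cons] at h1
      simpa using h1
    subst hd0
    have hsplit : ts.toList.takeWhile (fun c => c != '.') ++ '.' :: tl = ts.toList := by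
      rw [← hdweq]; exact List.takeWhile_append_dropWhile
    have htake : ts.toList.take d = ts.toList.takeWhile (fun c => c != '.') := by
      conv_lhs => rw [← hsplit]
      rw [hd]; exact List.take_left
    have hdrop : ts.toList.drop d = '.' :: tl := by
      conv_lhs => rw [← hsplit]
      rw [hd]; exact List.drop_left
    -- A side
    have hne : (((d : Int)) == -1) = false := by simp
    have hrest : PySem.List.slice ts.toList (some (d : Int)) none = '.' :: tl := by
      rw [PySem.List.slice_from ts.toList (by omega : (0:Int) ≤ (d : Int))]
      simpa using hdrop
    simp only [truncate_timestamp_py, hfind', hne, Bool.false_eq_true, if_false, hrest,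
      PySem.List.enumerate_cons, pvALoop]
    rw [if_neg (by simp)]
    rw [show ((0 : Int) + 1) = ((0 : Nat) : Int) + 1 by simp]
    rw [pv_aloop ts ((d : Int)) ('.' :: tl) tl 0]
    -- B side
    simp only [truncate_timestamp_py_alt, hdweq, List.tail_cons, pv_bpos tl]
    set w := (tl.takeWhile (fun c => !(pvTz c))).length with hw
    have hslice_t : PySem.List.slice ts.toList none (some (d : Int)) = ts.toList.takeWhile (fun c => c != '.') := by
      rw [PySem.List.slice_to ts.toList (by omega : (0:Int) ≤ (d : Int))]
      simpa using htake
    have hslice_b : PySem.List.slice tl (some (w : Int)) none = tl.drop w := by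
      rw [PySem.List.slice_from tl (by omega : (0:Int) ≤ (w : Int))]
      simp
    rw [hslice_b]
    by_cases hany : tl.any pvTz = true
    · rw [if_pos hany]
      rw [hslice_t]
      have hidx : ((0 : Nat) : Int) + 1 + (w : Int) = ((1 + w : Nat) : Int) := by push_cast; ring
      rw [hidx]
      have : PySem.List.slice ('.' :: tl) (some ((1 + w : Nat) : Int)) none = tl.drop w := by
        rw [PySem.List.slice_from _ (by omega : (0:Int) ≤ ((1 + w : Nat) : Int))]
        have h1 : (((1 + w : Nat) : Int)).toNat = w + 1 := by omega
        rw [h1, List.drop_succ_cons]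
      rw [this]
    · rw [if_neg hany]
      rw [hslice_t]
      have hwlen : w = tl.length := by
        rw [hw]
        exact pv_tw_eq_len _ tl (fun x hx => by
          have : pvTz x = false := by
            rcases Bool.eq_false_or_eq_true (pvTz x) with h | h
            · exact absurd (List.any_eq_true.mpr ⟨x, hx, h⟩) hany
            · exact h
          simp [this])
      rw [hwlen]
      simp
  · -- no dot: A returns ts unchanged
    have hfind : PySem.Str.find ts "." = -1 := by
      rw [PySem.Str.find_eq]
      exact pv_find_singleton_not_mem '.' ts.toList hdot
    simp only [truncate_timestamp_py, hfind]
    rw [if_pos (by simp)]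
    -- B
    simp only [truncate_timestamp_py_alt]
    have htw : ts.toList.takeWhile (fun c => c != '.') = ts.toList :=
      List.takeWhile_eq_self_iff.mpr (fun x hx => by
        simp
        intro h; subst h; exact hdot hx)
    have hdw : ts.toList.dropWhile (fun c => c != '.') = [] :=
      List.dropWhile_eq_nil_iff.mpr (fun x hx => by
        simp
        intro h; subst h; exact hdot hx)
    rw [htw, hdw]
    simp only [List.tail_nil]
    have hfnil : ∀ c, PySem.Chars.find ([] : List Char) [c] = -1 := fun c =>
      pv_find_singleton_not_mem c [] (by simp)
    simp only [List.map_cons, List.map_nil, hfnil]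
    simp [pvMinDefault, PySem.List.slice, String.ofList_toList]

-- ===== VERDICT (by name: the statement is the Claim_ definition above) =====
theorem truncate_timestamp_py_spec : Claim_equal_truncate_timestamp_py := by
  intro ts _
  unfold Spec_truncate_timestamp_py
  exact pv_main ts
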